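-- pv_equiv track=rewrite | github.com/ravi-blade5/job_automation | job_automation/sources/firecrawl_source.py | _rank_links
-- ===== SOURCE A (Python) =====
-- from typing import Any, Dict, Iterable, List
--
-- def _rank_links(links: List[str]) -> List[str]:
--     def score(url: str) -> int:
--         lowered = url.lower()
--         value = 0
--         priority_patterns = [
--             "greenhouse.io",
--             "boards.greenhouse.io",
--             "jobs.lever.co",
--             "myworkdayjobs.com",
--             "ashbyhq.com",
--             "smartrecruiters.com",
--             "/jobs/",
--             "/job/",
--             "/openings/",
--             "/positions/",
--             "/careers/",
--             "/career/",
--             "jobid=",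
--             "requisition",
--             "reqid=",
--         ]
--         for pattern in priority_patterns:
--             if pattern in lowered:
--                 value += 2
--         if "/team" in lowered or "/about" in lowered:
--             value -= 2
--         return value
--
--     return sorted(links, key=score, reverse=True)
-- ===== SOURCE B (Python) =====
-- from typing import List
--
-- _PATTERNS = (
--     "greenhouse.io boards.greenhouse.io jobs.lever.co myworkdayjobs.com "
--     "ashbyhq.com smartrecruiters.com /jobs/ /job/ /openings/ /positions/ "
--     "/careers/ /career/ jobid= requisition reqid="
-- ).split()
--
--
-- def _score(url: str) -> int:
--     low = url.lower()
--     s = 2 * sum(1 for p in _PATTERNS if p in low)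
--     if "/team" in low or "/about" in low:
--         s -= 2
--     return s
--
--
-- def _rank_links(links: List[str]) -> List[str]:
--     # Scores live in the fixed range [-2, 30]; no sort needed: scan the
--     # possible score values top-down and emit each bucket in input order.
--     scored = [(_score(u), u) for u in links]
--     out = []
--     for s in range(30, -3, -1):
--         out += [u for (sc, u) in scored if sc == s]
--     return out
-- ===== Notes on version B (the rewrite author's own statement) =====
-- stated objective: alternative
-- what changed: Replaces the comparison sort (sorted with key, reverse=True) by a sort-free bucket scan: each link's score is computed once (as 2*count of matching patterns instead of an accumulating loop), and the output is produced by sweeping the fixed possible score range 30..-2 downwards, emitting each score's links in input order (stability for free).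
import Mathlib
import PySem

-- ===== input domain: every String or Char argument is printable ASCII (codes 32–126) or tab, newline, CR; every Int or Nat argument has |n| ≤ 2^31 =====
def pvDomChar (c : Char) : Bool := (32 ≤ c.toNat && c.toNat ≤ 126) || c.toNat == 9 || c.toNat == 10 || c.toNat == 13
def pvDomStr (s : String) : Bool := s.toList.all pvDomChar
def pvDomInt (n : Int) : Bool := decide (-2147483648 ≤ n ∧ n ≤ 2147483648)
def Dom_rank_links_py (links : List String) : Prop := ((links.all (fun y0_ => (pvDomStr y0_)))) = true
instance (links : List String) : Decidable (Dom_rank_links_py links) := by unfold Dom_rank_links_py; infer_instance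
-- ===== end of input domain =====

-- B drops the comparison sort entirely: scores lie in the fixed range [-2, 30], so it scans the
-- possible score values top-down and emits each bucket in input order (alternative decomposition).

-- ===== PORT A =====
-- A's nested 'score' helper: the pattern list and the foldl accumulating +2 per hit
def pvPriorityPatterns : List String :=
  ["greenhouse.io", "boards.greenhouse.io", "jobs.lever.co", "myworkdayjobs.com",
   "ashbyhq.com", "smartrecruiters.com", "/jobs/", "/job/", "/openings/",
   "/positions/", "/careers/", "/career/", "jobid=", "requisition", "reqid="]

def pvScore (url : String) : Int :=
  let lowered := PySem.Str.lower url
  let value : Int := 0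
  let value := pvPriorityPatterns.foldl (fun v p => if PySem.Str.isIn p lowered then v + 2 else v) value
  if PySem.Str.isIn "/team" lowered || PySem.Str.isIn "/about" lowered then value - 2 else value

def rank_links_py (links : List String) : List String :=
  PySem.List.sorted links pvScore true

-- ===== PORT B =====
-- B's module-level _PATTERNS tuple and its _score helper (the 0/1-sum is ported as a filter length)
def pvAltPatterns : List String :=
  PySem.Str.split₀ ("greenhouse.io boards.greenhouse.io jobs.lever.co myworkdayjobs.com " ++
    "ashbyhq.com smartrecruiters.com /jobs/ /job/ /openings/ /positions/ " ++
    "/careers/ /career/ jobid= requisition reqid=")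

def pvAltScore (url : String) : Int :=
  let low := PySem.Str.lower url
  let s : Int := 2 * ((pvAltPatterns.filter (fun p => PySem.Str.isIn p low)).length : Int)
  if PySem.Str.isIn "/team" low || PySem.Str.isIn "/about" low then s - 2 else s

def rank_links_py_alt (links : List String) : List String :=
  let scored := links.map (fun u => (pvAltScore u, u))
  (PySem.List.pyRange 30 (-3) (-1)).foldl
    (fun out s => out ++ (scored.filter (fun p => p.1 == s)).map Prod.snd) []

-- ===== PRECONDITION & SPEC =====
def Spec_rank_links_py (links : List String) (out : List String) : Prop := out = rank_links_py_alt links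
instance (links : List String) (out : List String) : Decidable (Spec_rank_links_py links out) := by unfold Spec_rank_links_py; infer_instance

-- ===== CLAIM =====
def Claim_equal_rank_links_py : Prop := ∀ (links : List String), Dom_rank_links_py links → Spec_rank_links_py links (rank_links_py links)

-- ===== LEMMAS AND PROOFS =====

-- B's score computes A's score
lemma foldl_two_eq (lst : List String) (low : String) (v : Int) :
    lst.foldl (fun v p => if PySem.Str.isIn p low then v + 2 else v) v
      = v + 2 * ((lst.filter (fun p => PySem.Str.isIn p low)).length : Int) := by
  induction lst generalizing v with
  | nil => simp
  | cons p ps ih =>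
    rw [List.foldl_cons, List.filter_cons]
    by_cases h : PySem.Str.isIn p low
    · rw [if_pos h, if_pos h, ih, List.length_cons]; push_cast; ring
    · rw [if_neg h, if_neg h, ih]

set_option maxRecDepth 8000 in
lemma altPatterns_eq : pvAltPatterns = pvPriorityPatterns := by decide

lemma altScore_eq (u : String) : pvAltScore u = pvScore u := by
  simp only [pvAltScore, pvScore, altPatterns_eq]
  rw [foldl_two_eq]
  simp

-- the descending score range B scans
def pvR : List Int := PySem.List.pyRange 30 (-3) (-1)

lemma pvR_lit : pvR = [30, 29, 28, 27, 26, 25, 24, 23, 22, 21, 20, 19, 18, 17, 16, 15, 14,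
    13, 12, 11, 10, 9, 8, 7, 6, 5, 4, 3, 2, 1, 0, -1, -2] := by decide

lemma pairwise_pvR : pvR.Pairwise (fun a b => b < a) := by decide

lemma mem_pvR {s : Int} (h1 : -2 ≤ s) (h2 : s ≤ 30) : s ∈ pvR := by
  rw [pvR_lit]
  simp only [List.mem_cons, List.not_mem_nil, or_false]
  omega

lemma score_mem_pvR (u : String) : pvScore u ∈ pvR := by
  rw [← altScore_eq u]
  have hlen : ((pvAltPatterns.filter
      (fun p => PySem.Str.isIn p (PySem.Str.lower u))).length : Int) ≤ 15 := by
    have h1 := List.length_filter_le (fun p => PySem.Str.isIn p (PySem.Str.lower u)) pvAltPatterns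
    have h2 : pvAltPatterns.length = 15 := by rw [altPatterns_eq]; decide
    omega
  simp only [pvAltScore]
  split <;> (apply mem_pvR <;> omega)

-- insert a score into a strictly descending list of distinct scores (proof-side model of the distinct score keys)
def insD (c : Int) : List Int → List Int
  | [] => [c]
  | s :: ks => if s < c then c :: s :: ks else if c = s then s :: ks else s :: insD c ks

def dKeys (links : List String) : List Int :=
  links.foldl (fun ks y => insD (pvScore y) ks) []

lemma mem_insD (c t : Int) (ks : List Int) : t ∈ insD c ks ↔ t = c ∨ t ∈ ks := by
  induction ks with
  | nil => simp [insD]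
  | cons s ks ih =>
    by_cases h1 : s < c
    · simp [insD, h1]
    · by_cases h2 : c = s
      · simp [insD, h2]
      · simp [insD, h1, h2, ih]; tauto

lemma pairwise_insD (c : Int) (ks : List Int) (h : ks.Pairwise (fun a b => b < a)) :
    (insD c ks).Pairwise (fun a b => b < a) := by
  induction ks with
  | nil => simp [insD]
  | cons s ks ih =>
    rw [List.pairwise_cons] at h
    obtain ⟨hs, hks⟩ := h
    by_cases h1 : s < c
    · rw [insD, if_pos h1, List.pairwise_cons]
      constructor
      · intro b hb
        rcases List.mem_cons.mp hb with rfl | hb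
        · exact h1
        · exact lt_trans (hs b hb) h1
      · rw [List.pairwise_cons]; exact ⟨hs, hks⟩
    · by_cases h2 : c = s
      · rw [insD, if_neg h1, if_pos h2, List.pairwise_cons]; exact ⟨hs, hks⟩
      · rw [insD, if_neg h1, if_neg h2, List.pairwise_cons]
        constructor
        · intro b hb
          rcases (mem_insD c b ks).mp hb with rfl | hb
          · omega
          · exact hs b hb
        · exact ih hks

lemma dKeys_append (l : List String) (x : String) :
    dKeys (l ++ [x]) = insD (pvScore x) (dKeys l) := by
  simp [dKeys, List.foldl_append]

lemma mem_dKeys (l : List String) (s : Int) :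
    s ∈ dKeys l ↔ ∃ y ∈ l, pvScore y = s := by
  induction l using List.reverseRecOn with
  | nil => simp [dKeys]
  | append_singleton l x ih =>
    rw [dKeys_append, mem_insD, ih]
    constructor
    · rintro (rfl | ⟨y, hy, hs⟩)
      · exact ⟨x, by simp, rfl⟩
      · exact ⟨y, by simp [hy], hs⟩
    · rintro ⟨y, hy, hs⟩
      rcases List.mem_append.mp hy with h | h
      · exact Or.inr ⟨y, h, hs⟩
      · simp at h; subst h; exact Or.inl hs.symm

lemma pairwise_dKeys (l : List String) : (dKeys l).Pairwise (fun a b => b < a) := by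
  induction l using List.reverseRecOn with
  | nil => simp [dKeys]
  | append_singleton l x ih => rw [dKeys_append]; exact pairwise_insD _ _ ih

lemma insertBy_pos {α : Type} (bf : α → α → Bool) (x : α) (bs : List α)
    (h : ∀ y ∈ bs, bf x y = true) : PySem.List.insertBy bf x bs = x :: bs := by
  cases bs with
  | nil => simp [PySem.List.insertBy]
  | cons y ys => rw [PySem.List.insertBy.eq_def]; simp [h y (by simp)]

lemma insertBy_append_neg {α : Type} (bf : α → α → Bool) (x : α) (as bs : List α)
    (h : ∀ y ∈ as, bf x y = false) :
    PySem.List.insertBy bf x (as ++ bs) = as ++ PySem.List.insertBy bf x bs := by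
  induction as with
  | nil => simp
  | cons a as ih =>
    rw [List.cons_append, PySem.List.insertBy.eq_def]
    simp [h a (by simp)]
    exact ih (fun y hy => h y (by simp [hy]))

lemma flatMap_ite_eq (c : Int) (x : String) (F : Int → List String) (ks : List Int)
    (h : c ∉ ks) :
    ks.flatMap (fun s => F s ++ if c = s then [x] else []) = ks.flatMap F := by
  induction ks with
  | nil => simp
  | cons s ks ih =>
    have hcs : c ≠ s := fun hh => h (by simp [hh])
    simp only [List.flatMap_cons, if_neg hcs, List.append_nil]
    rw [ih (fun hh => h (by simp [hh]))]

lemma step_lemma (x : String) (ks : List Int) (F : Int → List String)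
    (hd : ks.Pairwise (fun a b => b < a))
    (hF : ∀ s ∈ ks, ∀ y ∈ F s, pvScore y = s)
    (hc : pvScore x ∉ ks → F (pvScore x) = []) :
    PySem.List.insertBy (fun a b => decide (pvScore b < pvScore a)) x (ks.flatMap F)
      = (insD (pvScore x) ks).flatMap (fun s => F s ++ if pvScore x = s then [x] else []) := by
  induction ks with
  | nil =>
    simp only [List.flatMap_nil, insD, List.flatMap_cons, List.flatMap_nil,
      hc (List.not_mem_nil), List.nil_append, List.append_nil]
    simp [PySem.List.insertBy]
  | cons s ks ih =>
    rw [List.pairwise_cons] at hd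
    obtain ⟨hs, hks⟩ := hd
    by_cases h1 : s < pvScore x
    · have hnot : pvScore x ∉ s :: ks := by
        intro hh
        rcases List.mem_cons.mp hh with rfl | hh
        · omega
        · have := hs _ hh; omega
      rw [insD, if_pos h1]
      rw [insertBy_pos]
      · conv_rhs => rw [List.flatMap_cons]
        rw [flatMap_ite_eq _ _ _ _ hnot]
        simp [hc hnot]
      · intro y hy
        rcases List.mem_flatMap.mp hy with ⟨t, ht, hyt⟩
        have hyscore := hF t ht y hyt
        simp only [decide_eq_true_eq, hyscore]
        rcases List.mem_cons.mp ht with rfl | ht'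
        · exact h1
        · exact lt_trans (hs _ ht') h1
    · by_cases h2 : pvScore x = s
      · rw [insD, if_neg h1, if_pos h2]
        have hnotks : pvScore x ∉ ks := by
          intro hh; have := hs _ hh; omega
        simp only [List.flatMap_cons]
        rw [insertBy_append_neg]
        · rw [insertBy_pos]
          · rw [flatMap_ite_eq _ _ _ _ hnotks]
            simp [h2]
          · intro y hy
            rcases List.mem_flatMap.mp hy with ⟨t, ht, hyt⟩
            have := hF t (by simp [ht]) y hyt
            have := hs _ ht
            simp only [decide_eq_true_eq]
            omega
        · intro y hy
          have := hF s (by simp) y hy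
          simp only [decide_eq_false_iff_not]
          omega
      · have h3 : pvScore x < s := by omega
        rw [insD, if_neg h1, if_neg h2]
        simp only [List.flatMap_cons, if_neg h2, List.append_nil]
        rw [insertBy_append_neg]
        · rw [ih hks (fun t ht y hy => hF t (by simp [ht]) y hy)
            (fun hh => hc (fun hmem => by
              rcases List.mem_cons.mp hmem with rfl | hm
              · exact h2 rfl
              · exact hh hm))]
        · intro y hy
          have := hF s (by simp) y hy
          simp only [decide_eq_false_iff_not]
          omega

lemma main_lemma (l : List String) :
    PySem.List.sorted l pvScore true
      = (dKeys l).flatMap (fun s => l.filter (fun u => pvScore u == s)) := by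
  induction l using List.reverseRecOn with
  | nil => simp [PySem.List.sorted, dKeys]
  | append_singleton l x ih =>
    have h1 : PySem.List.sorted (l ++ [x]) pvScore true
        = PySem.List.insertBy (fun a b => decide (pvScore b < pvScore a)) x
            (PySem.List.sorted l pvScore true) := by
      simp [PySem.List.sorted, List.foldl_append]
    have hfil : ∀ s : Int, (l ++ [x]).filter (fun u => pvScore u == s)
        = l.filter (fun u => pvScore u == s) ++ if pvScore x = s then [x] else [] := by
      intro s
      rw [List.filter_append]
      by_cases h : pvScore x = s
      · simp [List.filter, h]
      · have hb : (pvScore x == s) = false := beq_eq_false_iff_ne.mpr h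
        simp [List.filter, hb, h]
    rw [h1, ih, step_lemma x (dKeys l) _
      (pairwise_dKeys l)
      (fun s _ y hy => by
        have := List.of_mem_filter hy
        exact beq_iff_eq.mp this)
      (fun hnm => List.filter_eq_nil_iff.mpr (fun y hy hbeq => by
        exact hnm ((mem_dKeys l _).mpr ⟨y, hy, beq_iff_eq.mp hbeq⟩)))]
    rw [dKeys_append]
    exact List.flatMap_congr (fun s _ => (hfil s).symm)

-- a bucket of B's scored pairs is the corresponding filter of the links themselves
lemma bucket_eq (l : List String) (s : Int) :
    ((l.map (fun u => (pvAltScore u, u))).filter (fun p => p.1 == s)).map Prod.snd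
      = l.filter (fun u => pvScore u == s) := by
  simp only [altScore_eq]
  induction l with
  | nil => simp
  | cons u l ih =>
    simp only [List.map_cons, List.filter_cons]
    by_cases h : pvScore u = s
    · simp [h, ih]
    · simp [beq_eq_false_iff_ne.mpr h, ih]

-- dropping empty buckets: flatMap over a list equals flatMap over its filter when F vanishes off it
lemma flatMap_filter_of_empty (R : List Int) (P : Int → Bool) (F : Int → List String)
    (h : ∀ s, P s = false → F s = []) :
    R.flatMap F = (R.filter P).flatMap F := by
  induction R with
  | nil => simp
  | cons s R ih =>
    by_cases hp : P s
    · simp [List.filter, hp, List.flatMap_cons, ih]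
    · have : P s = false := by simpa using hp
      simp [List.filter, this, List.flatMap_cons, ih, h s this]

lemma filter_pvR_eq_dKeys (l : List String) :
    pvR.filter (fun s => decide (s ∈ dKeys l)) = dKeys l := by
  have hmem : ∀ s : Int, s ∈ pvR.filter (fun t => decide (t ∈ dKeys l)) ↔ s ∈ dKeys l := by
    intro s
    rw [List.mem_filter]
    constructor
    · rintro ⟨_, h⟩; simpa using h
    · intro h
      refine ⟨?_, by simpa using h⟩
      rcases (mem_dKeys l s).mp h with ⟨y, _, hy⟩
      rw [← hy]; exact score_mem_pvR y
  have ha : (pvR.filter (fun t => decide (t ∈ dKeys l))).Pairwise (fun a b => b < a) :=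
    List.Pairwise.filter _ pairwise_pvR
  have hb := pairwise_dKeys l
  have hperm : (pvR.filter (fun t => decide (t ∈ dKeys l))).Perm (dKeys l) := by
    rw [List.perm_ext_iff_of_nodup
      (ha.imp (fun h => (ne_of_lt h).symm))
      (hb.imp (fun h => (ne_of_lt h).symm))]
    exact hmem
  exact hperm.eq_of_pairwise (by intro x y _ _ h1 h2; omega) ha hb

-- ===== VERDICT (by name: the statement is the Claim_ definition above) =====
theorem rank_links_py_spec : Claim_equal_rank_links_py := by
  intro links _
  show rank_links_py links = rank_links_py_alt links
  unfold rank_links_py rank_links_py_alt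
  rw [main_lemma]
  show _ = (PySem.List.pyRange 30 (-3) (-1)).foldl _ []
  rw [PySem.List.foldl_append_eq_flatMap]
  have hb : ∀ s : Int,
      ((links.map (fun u => (pvAltScore u, u))).filter (fun p => p.1 == s)).map Prod.snd
        = links.filter (fun u => pvScore u == s) := bucket_eq links
  calc (dKeys links).flatMap (fun s => links.filter (fun u => pvScore u == s))
      = (pvR.filter (fun s => decide (s ∈ dKeys links))).flatMap
          (fun s => links.filter (fun u => pvScore u == s)) := by
        rw [filter_pvR_eq_dKeys]
    _ = pvR.flatMap (fun s => links.filter (fun u => pvScore u == s)) := by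
        rw [← flatMap_filter_of_empty]
        intro s hs
        apply List.filter_eq_nil_iff.mpr
        intro y hy hbeq
        have : s ∈ dKeys links := (mem_dKeys links s).mpr ⟨y, hy, beq_iff_eq.mp hbeq⟩
        simp [this] at hs
    _ = [] ++ (PySem.List.pyRange 30 (-3) (-1)).flatMap
          (fun s => ((links.map (fun u => (pvAltScore u, u))).filter
            (fun p => p.1 == s)).map Prod.snd) := by
        simp only [pvR, List.nil_append]
        exact (List.flatMap_congr (fun s _ => (hb s).symm))
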